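-- pv_equiv track=rewrite | github.com/ryantimjohn/chicago_aldermen_campaign_finance | data_utilities/downloaddata.py | fixCSV
-- ===== SOURCE A (Python) =====
-- def fixCSV(dataIn): #this removes commas in quoted text that would otherwise mess up the alignment of the CSV
--     dataOut=""
--     quoted=False
--     for item in dataIn:
--         if "," in item:
--             if not quoted:
--                 dataOut=dataOut+","
--         else:
--             dataOut=dataOut+item
--         if '"' in item:
--             quoted=not quoted
--     return dataOut
-- ===== SOURCE B (Python) =====
-- def fixCSV(dataIn):
--     segs = dataIn.split('"')
--     return '"'.join(seg if i % 2 == 0 else seg.replace(',', '')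
--                     for i, seg in enumerate(segs))
-- ===== Notes on version B (the rewrite author's own statement) =====
-- stated objective: simpler
-- what changed: Replaces the per-character loop with its explicit quoted flag by splitting the string at the double-quote character, removing commas only from the odd (quoted) segments, and re-joining the segments with double quotes.
import Mathlib
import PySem

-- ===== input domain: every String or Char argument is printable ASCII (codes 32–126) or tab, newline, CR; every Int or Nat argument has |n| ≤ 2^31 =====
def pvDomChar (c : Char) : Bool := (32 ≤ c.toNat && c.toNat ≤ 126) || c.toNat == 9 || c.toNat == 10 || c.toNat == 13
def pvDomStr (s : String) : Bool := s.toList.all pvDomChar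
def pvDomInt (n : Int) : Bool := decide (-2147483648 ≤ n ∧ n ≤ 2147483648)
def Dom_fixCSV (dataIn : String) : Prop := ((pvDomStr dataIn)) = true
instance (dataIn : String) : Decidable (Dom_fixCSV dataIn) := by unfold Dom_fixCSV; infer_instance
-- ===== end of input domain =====

-- B replaces A's per-character loop and quoted flag by split-on-quote / strip commas
-- from odd segments / re-join; objective: simpler.

-- ===== PORT A =====
-- A's loop: per character, append ',' only when unquoted, other chars always; toggle on '"'.
def fixCSVLoop : List Char → Bool → List Char → List Char
  | acc, _, [] => acc
  | acc, quoted, c :: rest =>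
    fixCSVLoop
      (if c = ',' then (if !quoted then acc ++ [','] else acc) else acc ++ [c])
      (if c = '"' then !quoted else quoted)
      rest

def fixCSV (dataIn : String) : String :=
  String.mk (fixCSVLoop [] false dataIn.toList)

-- ===== PORT B =====
-- hand port of Python str.split for the single-char separator '"' (exact there)
def pySplitQ : List Char → List (List Char)
  | [] => [[]]
  | c :: rest =>
    if c = '"' then [] :: pySplitQ rest
    else
      match pySplitQ rest with
      | s :: t => (c :: s) :: t
      | [] => [[c]]

-- seg.replace(',', '') : exact, removing a char is filtering it out
def stripCommas (l : List Char) : List Char := l.filter (fun c => c ≠ ',')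

-- the generator expression: even-indexed segments unchanged, odd-indexed stripped
def altMap : List (List Char) → Bool → List (List Char)
  | [], _ => []
  | s :: t, odd => (if odd then stripCommas s else s) :: altMap t (!odd)

-- '"'.join(...)
def joinQ : List (List Char) → List Char
  | [] => []
  | [s] => s
  | s :: t => s ++ '"' :: joinQ t

def fixCSV_alt (dataIn : String) : String :=
  String.mk (joinQ (altMap (pySplitQ dataIn.toList) false))

-- ===== PRECONDITION & SPEC =====
def Spec_fixCSV (dataIn : String) (out : String) : Prop := out = fixCSV_alt dataIn
instance (dataIn : String) (out : String) : Decidable (Spec_fixCSV dataIn out) := by unfold Spec_fixCSV; infer_instance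

-- ===== CLAIM (what is proved, stated in full; the proofs are below) =====
def Claim_equal_fixCSV : Prop := ∀ (dataIn : String), Dom_fixCSV dataIn → Spec_fixCSV dataIn (fixCSV dataIn)

-- ===== LEMMAS AND PROOFS =====

theorem pySplitQ_ne_nil (l : List Char) : pySplitQ l ≠ [] := by
  cases l with
  | nil => simp [pySplitQ]
  | cons c rest =>
    simp only [pySplitQ]
    split_ifs
    · simp
    · cases h : pySplitQ rest <;> simp

theorem altMap_ne_nil (l : List (List Char)) (b : Bool) (h : l ≠ []) :
    altMap l b ≠ [] := by
  cases l with
  | nil => exact absurd rfl h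
  | cons s t => simp [altMap]

theorem fixCSVLoop_acc (l : List Char) : ∀ (acc : List Char) (q : Bool),
    fixCSVLoop acc q l = acc ++ fixCSVLoop [] q l := by
  induction l with
  | nil => intro acc q; simp [fixCSVLoop]
  | cons c rest ih =>
    intro acc q
    simp only [fixCSVLoop]
    rw [ih, ih ((if c = ',' then (if !q then [] ++ [','] else []) else [] ++ [c]))]
    split_ifs <;> simp

theorem joinQ_cons (s : List Char) (t : List (List Char)) (ht : t ≠ []) :
    joinQ (s :: t) = s ++ '"' :: joinQ t := by
  cases t with
  | nil => exact absurd rfl ht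
  | cons a b => rfl

theorem joinQ_cons' (x : List Char) (u : List (List Char)) :
    joinQ (x :: u) = x ++ (match u with | [] => [] | _ => '"' :: joinQ u) := by
  cases u <;> simp [joinQ]

theorem main_lemma (l : List Char) : ∀ (q : Bool),
    fixCSVLoop [] q l = joinQ (altMap (pySplitQ l) q) := by
  induction l with
  | nil => intro q; simp [fixCSVLoop, pySplitQ, altMap, joinQ, stripCommas]
  | cons c rest ih =>
    intro q
    by_cases hq : c = '"'
    · subst hq
      have h1 : pySplitQ ('"' :: rest) = [] :: pySplitQ rest := by
        simp [pySplitQ]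
      rw [h1]
      simp only [altMap]
      rw [joinQ_cons _ _ (altMap_ne_nil _ _ (pySplitQ_ne_nil rest))]
      simp only [fixCSVLoop, if_pos rfl]
      have : ('"' : Char) ≠ ',' := by decide
      rw [if_neg this, fixCSVLoop_acc, ih]
      split_ifs <;> simp [stripCommas]
    · -- c ≠ '"'
      obtain ⟨s, t, hst⟩ : ∃ s t, pySplitQ rest = s :: t := by
        cases h : pySplitQ rest with
        | nil => exact absurd h (pySplitQ_ne_nil rest)
        | cons a b => exact ⟨a, b, rfl⟩
      have h1 : pySplitQ (c :: rest) = (c :: s) :: t := by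
        simp only [pySplitQ, if_neg hq, hst]
      rw [h1]
      simp only [altMap]
      have hrhs : joinQ (altMap (pySplitQ rest) q) =
          (if q then stripCommas s else s) ++
            (match altMap t (!q) with | [] => [] | u => '"' :: joinQ u) := by
        rw [hst]; simp only [altMap]
        cases h : altMap t (!q) with
        | nil => simp [joinQ]
        | cons a b => rw [joinQ_cons _ _ (by simp)]
      have hlhs : fixCSVLoop [] q (c :: rest) =
          (if c = ',' then (if !q then [','] else []) else [c]) ++ fixCSVLoop [] q rest := by
        simp only [fixCSVLoop, if_neg hq]
        rw [fixCSVLoop_acc]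
        simp
      rw [hlhs, ih, hrhs]
      by_cases hc : c = ','
      · subst hc
        cases q with
        | false => simp [joinQ_cons', stripCommas] <;> (cases altMap t true <;> simp)
        | true => simp [joinQ_cons', stripCommas] <;> (cases altMap t false <;> simp)
      · rw [if_neg hc]
        split_ifs <;> simp [joinQ_cons', stripCommas, hc] <;>
          (cases altMap t (!q) <;> simp)

-- ===== VERDICT (by name: the statement is the Claim_ definition above) =====
theorem fixCSV_spec : Claim_equal_fixCSV := by
  intro dataIn _
  unfold Spec_fixCSV fixCSV fixCSV_alt
  rw [main_lemma]
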